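-- pv_equiv track=rewrite | github.com/Deltares/HYDROLIB-core | hydrolib/core/dflowfm/tim/parser.py | _read_header_comments
-- ===== SOURCE A (Python) =====
-- from typing import Any, Dict, List, Tuple
--
-- def _read_header_comments(lines: List[str]) -> Tuple[List[str], int]:
--     """Read the header comments of the lines from the .tim file.
--     The comments are only expected at the start of the .tim file.
--     When a non comment line is encountered, all comments from the header will be retuned together with the start index of the timeseries data.
--
--     Args:
--         lines (List[str]): Lines from the the .tim file which is read.
--
--     Returns:
--         Tuple of List[str] and int, the List[str] contains the commenst from the header, the int is the start index of the timeseries.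
--     """
--     comments: List[str] = []
--     start_timeseries_index = 0
--     for line_index in range(len(lines)):
--
--         line = lines[line_index].strip()
--
--         if len(line) == 0:
--             comments.append(line)
--             continue
--
--         if line.startswith("#") or line.startswith("*"):
--             comments.append(line[1:])
--             continue
--
--         start_timeseries_index = line_index
--         break
--
--     return comments, start_timeseries_index
-- ===== SOURCE B (Python) =====
-- from typing import List, Tuple
--
--
-- def _header_comment(raw: str) -> str:
--     s = raw.strip()
--     return s[1:] if s.startswith(("#", "*")) else s
--
--
-- def _read_header_comments(lines: List[str]) -> Tuple[List[str], int]: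
--     d = None
--     for i, raw in enumerate(lines):
--         s = raw.strip()
--         if s and not s.startswith(("#", "*")):
--             d = i
--             break
--     header = lines if d is None else lines[:d]
--     comments = [_header_comment(raw) for raw in header]
--     return comments, d or 0
-- ===== Notes on version B (the rewrite author's own statement) =====
-- stated objective: simpler
-- what changed: Replaces the single index loop with unsynchronized accumulators by a two-phase decomposition: first locate the index of the first data line, then build the comments as a comprehension over the header slice.
import Mathlib
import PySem

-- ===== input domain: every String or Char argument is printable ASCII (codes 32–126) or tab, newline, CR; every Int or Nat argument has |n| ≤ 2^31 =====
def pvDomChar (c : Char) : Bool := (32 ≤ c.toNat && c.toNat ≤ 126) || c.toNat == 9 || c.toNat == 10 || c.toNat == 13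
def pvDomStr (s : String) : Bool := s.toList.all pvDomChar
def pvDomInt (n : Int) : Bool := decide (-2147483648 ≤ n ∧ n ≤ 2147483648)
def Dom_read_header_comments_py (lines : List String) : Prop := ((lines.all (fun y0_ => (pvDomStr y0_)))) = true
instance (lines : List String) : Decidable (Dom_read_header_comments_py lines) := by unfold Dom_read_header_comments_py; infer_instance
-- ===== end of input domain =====

-- B is the same task written as two phases (find the first data line, then map the header
-- slice) instead of A's one loop that both appends and breaks; same cost, plainer to read.

-- ===== PORT A =====
-- A's for-loop over range(len(lines)) with `comments` accumulator and break.
def pvA_loop : List String → Nat → List String → List String × Int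
  | [], _, comments => (comments, 0)
  | l :: rest, i, comments =>
    let line := PySem.Str.strip l
    if PySem.Str.len line = 0 then
      pvA_loop rest (i + 1) (comments ++ [line])
    else if PySem.Str.startswith line "#" || PySem.Str.startswith line "*" then
      pvA_loop rest (i + 1) (comments ++ [PySem.Str.slice line (some 1) none])
    else (comments, (i : Int))

def read_header_comments_py (lines : List String) : List String × Int :=
  pvA_loop lines 0 []

-- ===== PORT B =====
-- `_header_comment`: strip, drop the marker character if present.
def pvB_hdr (raw : String) : String :=
  let s := PySem.Str.strip raw
  if PySem.Str.startswith s "#" || PySem.Str.startswith s "*" then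
    PySem.Str.slice s (some 1) none
  else s

-- phase 1: index of the first non-empty non-comment line (Python's `d`, None if absent)
def pvB_find : List String → Nat → Option Nat
  | [], _ => none
  | raw :: rest, i =>
    if PySem.Str.len (PySem.Str.strip raw) ≠ 0 ∧
        PySem.Str.startswith (PySem.Str.strip raw) "#" = false ∧
        PySem.Str.startswith (PySem.Str.strip raw) "*" = false
    then some i
    else pvB_find rest (i + 1)

def read_header_comments_py_alt (lines : List String) : List String × Int :=
  let d := pvB_find lines 0
  let header := match d with
    | none => lines
    | some k => PySem.List.slice lines none (some (k : Int))
  (header.map pvB_hdr,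
   match d with
   | none => 0
   | some k => if k = 0 then 0 else (k : Int))   -- Python's `d or 0`

-- ===== PRECONDITION & SPEC =====
def Spec_read_header_comments_py (lines : List String) (out : List String × Int) : Prop := out = read_header_comments_py_alt lines
instance (lines : List String) (out : List String × Int) : Decidable (Spec_read_header_comments_py lines out) := by unfold Spec_read_header_comments_py; infer_instance

-- ===== CLAIM (what is proved, stated in full; the proofs are below) =====
def Claim_equal_read_header_comments_py : Prop := ∀ (lines : List String), Dom_read_header_comments_py lines → Spec_read_header_comments_py lines (read_header_comments_py lines)

-- ===== LEMMAS AND PROOFS =====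

theorem pvB_find_ge (xs : List String) (i k : Nat) (h : pvB_find xs i = some k) : i ≤ k := by
  induction xs generalizing i with
  | nil => simp [pvB_find] at h
  | cons raw rest ih =>
    unfold pvB_find at h
    split at h
    · simp at h; omega
    · have := ih (i + 1) h; omega

theorem pvA_loop_eq (xs : List String) (i : Nat) (acc : List String) :
    pvA_loop xs i acc =
      match pvB_find xs i with
      | none => (acc ++ xs.map pvB_hdr, 0)
      | some k => (acc ++ (xs.take (k - i)).map pvB_hdr, (k : Int)) := by
  induction xs generalizing i acc with
  | nil => simp [pvA_loop, pvB_find]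
  | cons raw rest ih =>
    unfold pvA_loop pvB_find
    by_cases hz : PySem.Str.len (PySem.Str.strip raw) = 0
    · have hnil : PySem.Chars.strip raw.toList = [] :=
        List.eq_nil_of_length_eq_zero (by simpa using hz)
      have h1 : PySem.Chars.startswith (PySem.Chars.strip raw.toList) ['#'] = false := by
        rw [hnil]; decide
      have h2 : PySem.Chars.startswith (PySem.Chars.strip raw.toList) ['*'] = false := by
        rw [hnil]; decide
      have hB : pvB_hdr raw = PySem.Str.strip raw := by
        unfold pvB_hdr
        rw [if_neg (by simp [h1, h2])]
      rw [if_pos hz, if_neg (by simp [hnil])]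
      rw [ih]
      cases hf : pvB_find rest (i + 1) with
      | none => simp [hB]
      | some k =>
        have hk := pvB_find_ge rest (i + 1) k hf
        have hki : k - i = (k - (i + 1)) + 1 := by omega
        simp [hki, hB]
    · by_cases hc : PySem.Chars.startswith (PySem.Chars.strip raw.toList) ['#'] = true ∨
          PySem.Chars.startswith (PySem.Chars.strip raw.toList) ['*'] = true
      · rw [if_neg hz]
        rw [if_pos (by simp; tauto)]
        rw [if_neg (by
          simp
          intro _ hn1
          rcases hc with h | h
          · rw [h] at hn1; cases hn1
          · exact h)]
        rw [ih]
        have hB : pvB_hdr raw = PySem.Str.slice (PySem.Str.strip raw) (some 1) none := by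
          unfold pvB_hdr
          rw [if_pos (by simp; tauto)]
        cases hf : pvB_find rest (i + 1) with
        | none => simp [hB]
        | some k =>
          have hk := pvB_find_ge rest (i + 1) k hf
          have hki : k - i = (k - (i + 1)) + 1 := by omega
          simp [hki, hB]
      · rw [not_or] at hc
        obtain ⟨h1, h2⟩ := hc
        rw [if_neg hz, if_neg (by simp [Bool.eq_false_iff.mpr h1, Bool.eq_false_iff.mpr h2]),
            if_pos ⟨hz, by simpa using Bool.eq_false_iff.mpr h1, by simpa using Bool.eq_false_iff.mpr h2⟩]
        simp

-- ===== VERDICT (by name: the statement is the Claim_ definition above) =====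
theorem read_header_comments_py_spec : Claim_equal_read_header_comments_py := by
  intro lines _
  unfold Spec_read_header_comments_py read_header_comments_py read_header_comments_py_alt
  rw [pvA_loop_eq]
  cases hf : pvB_find lines 0 with
  | none => simp
  | some k =>
    simp only [PySem.List.slice_to_natCast]
    by_cases hk : k = 0 <;> simp [hk]
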